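-- pv_equiv track=rewrite | github.com/brianstrauch/google-code-jam | 2020/c.py | solve
-- ===== SOURCE A (Python) =====
-- def solve(A):
--   n = len(A)
--
--   A = [[s, e, i] for i, [s, e] in enumerate(A)]
--   A = sorted(A)
--
--   c = 0
--   j = 0
--
--   ans = ['X' for _ in range(n)]
--   for s, e, i in A:
--     if c <= s:
--       c = e
--       ans[i] = 'C'
--     elif j <= s:
--       j = e
--       ans[i] = 'J'
--     else:
--       return 'IMPOSSIBLE'
--
--   return ''.join(ans)
-- ===== SOURCE B (Python) =====
-- def solve(A):
--   order = sorted((s, e, i) for i, (s, e) in enumerate(A))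
--   ans = ['X'] * len(A)
--
--   # pass 1: greedily give intervals to C, collect the leftovers
--   c = 0
--   rest = []
--   for s, e, i in order:
--     if c <= s:
--       c = e
--       ans[i] = 'C'
--     else:
--       rest.append((s, e, i))
--
--   # pass 2: give the leftovers to J
--   j = 0
--   for s, e, i in rest:
--     if j <= s:
--       j = e
--       ans[i] = 'J'
--     else:
--       return 'IMPOSSIBLE'
--
--   return ''.join(ans)
-- ===== Notes on version B (the rewrite author's own statement) =====
-- stated objective: alternative
-- what changed: Replaces the single interleaved greedy loop carrying both free-times (c, j) with two independent linear passes over the sorted intervals: the first assigns C greedily and collects leftovers, the second assigns the leftovers to J; equivalent because A updates c only on C-steps and j only on J-steps.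
import Mathlib
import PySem

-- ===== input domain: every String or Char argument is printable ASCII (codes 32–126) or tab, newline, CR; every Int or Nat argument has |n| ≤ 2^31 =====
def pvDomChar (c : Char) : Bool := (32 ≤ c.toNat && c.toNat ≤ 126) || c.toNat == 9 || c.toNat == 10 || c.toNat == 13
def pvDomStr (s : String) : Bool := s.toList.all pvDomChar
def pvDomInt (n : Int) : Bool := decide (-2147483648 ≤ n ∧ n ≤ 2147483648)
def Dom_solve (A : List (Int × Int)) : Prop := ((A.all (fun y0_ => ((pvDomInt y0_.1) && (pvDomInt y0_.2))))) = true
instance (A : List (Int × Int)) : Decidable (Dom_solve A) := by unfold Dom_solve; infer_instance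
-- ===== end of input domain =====

-- B replaces A's single interleaved greedy loop (state c and j together) with two independent
-- passes: assign C greedily, then assign the leftovers to J — same result, a different decomposition.

-- ===== PORT A =====
-- One interleaved greedy loop over the sorted indexed intervals, carrying both free-times c and j.
-- ans[i] = 'C' : i comes from enumerate, so 0 ≤ i < len(ans); List.set i.toNat is exact there.
def loopA : Int → Int → List Char → List (Int × Int × Int) → Option (List Char)
  | _, _, ans, [] => some ans
  | c, j, ans, (s, e, i) :: t =>
    if c ≤ s then loopA e j (ans.set i.toNat 'C') t
    else if j ≤ s then loopA c e (ans.set i.toNat 'J') t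
    else none

-- Python sorts the lists [s, e, i] lexicographically; since the third component i is strictly
-- increasing in the original (enumerate) order, a STABLE sort on the key (s, e) produces exactly
-- the same order, so sorted2 with keys s and e is exact here (used identically by both ports).
def prep (A : List (Int × Int)) : List (Int × Int × Int) :=
  PySem.List.sorted2 ((PySem.List.enumerate A).map (fun p => (p.2.1, p.2.2, p.1)))
    (fun t => t.1) (fun t => t.2.1)

def solve (A : List (Int × Int)) : String :=
  match loopA 0 0 (List.replicate A.length 'X') (prep A) with
  | some ans => String.ofList ans
  | none => "IMPOSSIBLE"

-- ===== PORT B =====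
-- pass 1: greedily give intervals to C, collect the leftovers (in order)
def altPassC : Int → List Char → List (Int × Int × Int) → (List Char × List (Int × Int × Int))
  | _, ans, [] => (ans, [])
  | c, ans, (s, e, i) :: t =>
    if c ≤ s then altPassC e (ans.set i.toNat 'C') t
    else
      let r := altPassC c ans t
      (r.1, (s, e, i) :: r.2)

-- pass 2: give the leftovers to J
def altPassJ : Int → List Char → List (Int × Int × Int) → Option (List Char)
  | _, ans, [] => some ans
  | j, ans, (s, e, i) :: t =>
    if j ≤ s then altPassJ e (ans.set i.toNat 'J') t
    else none

def solve_alt (A : List (Int × Int)) : String :=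
  let r := altPassC 0 (List.replicate A.length 'X') (prep A)
  match altPassJ 0 r.1 r.2 with
  | some ans => String.ofList ans
  | none => "IMPOSSIBLE"

-- ===== PRECONDITION & SPEC =====
def Spec_solve (A : List (Int × Int)) (out : String) : Prop := out = solve_alt A
instance (A : List (Int × Int)) (out : String) : Decidable (Spec_solve A out) := by unfold Spec_solve; infer_instance

-- ===== CLAIM (what is proved, stated in full; the proofs are below) =====
def Claim_equal_solve : Prop := ∀ (A : List (Int × Int)), Dom_solve A → Spec_solve A (solve A)

-- ===== LEMMAS AND PROOFS =====

-- a set at an index not touched by the first pass commutes through it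
lemma altPassC_set (t : List (Int × Int × Int)) (i : Int)
    (hi : i.toNat ∉ t.map (fun u => u.2.2.toNat)) :
    ∀ (c : Int) (ans : List Char) (x : Char),
      altPassC c (ans.set i.toNat x) t
        = ((altPassC c ans t).1.set i.toNat x, (altPassC c ans t).2) := by
  induction t with
  | nil => intro c ans x; simp [altPassC]
  | cons h t ih =>
    obtain ⟨s, e, i'⟩ := h
    simp only [List.map_cons, List.mem_cons, not_or] at hi
    intro c ans x
    simp only [altPassC]
    by_cases hc : c ≤ s
    · rw [if_pos hc, if_pos hc, List.set_comm x 'C' hi.1]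
      exact ih hi.2 e _ x
    · rw [if_neg hc, if_neg hc, ih hi.2 c ans x]

-- the interleaved loop equals pass-C followed by pass-J on the leftovers,
-- provided the written indices are pairwise distinct
lemma loop_eq_two_passes (l : List (Int × Int × Int))
    (hnd : (l.map (fun u => u.2.2.toNat)).Nodup) :
    ∀ (c j : Int) (ans : List Char),
      loopA c j ans l = altPassJ j (altPassC c ans l).1 (altPassC c ans l).2 := by
  induction l with
  | nil => intro c j ans; simp [loopA, altPassC, altPassJ]
  | cons h t ih =>
    obtain ⟨s, e, i⟩ := h
    simp only [List.map_cons, List.nodup_cons] at hnd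
    intro c j ans
    by_cases hc : c ≤ s
    · simp only [loopA, altPassC, if_pos hc]
      exact ih hnd.2 e j (ans.set i.toNat 'C')
    · by_cases hj : j ≤ s
      · simp only [loopA, altPassC, if_neg hc, if_pos hj, altPassJ]
        rw [ih hnd.2 c e (ans.set i.toNat 'J'), altPassC_set t i hnd.1]
      · simp only [loopA, altPassC, if_neg hc, if_neg hj, altPassJ]

-- the indices written along prep A are pairwise distinct
lemma nodup_prep (A : List (Int × Int)) :
    ((prep A).map (fun u => u.2.2.toNat)).Nodup := by
  have hperm : (prep A).Perm ((PySem.List.enumerate A).map (fun p => (p.2.1, p.2.2, p.1))) :=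
    PySem.List.sorted2_perm _ _ _ _
  refine ((hperm.map (fun u => u.2.2.toNat)).nodup_iff).mpr ?_
  have : ((PySem.List.enumerate A).map (fun p => (p.2.1, p.2.2, p.1))).map
      (fun u : Int × Int × Int => u.2.2.toNat)
      = ((PySem.List.enumerate A).map (fun p => p.1)).map Int.toNat := by
    simp [List.map_map, Function.comp]
  rw [this, PySem.List.map_fst_enumerate]
  have h0 : PySem.List.pyRange 0 (0 + (A.length : Int)) 1 = (List.range A.length).map ((↑·)) := by
    simpa using PySem.List.pyRange_zero_natCast A.length
  rw [h0]
  simp only [List.map_map, Function.comp_def, Int.toNat_natCast, List.map_id_fun']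
  exact List.nodup_range

-- ===== VERDICT (by name: the statement is the Claim_ definition above) =====
theorem solve_spec : Claim_equal_solve := by
  intro A _
  unfold Spec_solve solve solve_alt
  rw [loop_eq_two_passes (prep A) (nodup_prep A) 0 0 (List.replicate A.length 'X')]
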